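-- pv_equiv track=rewrite | github.com/pypi-data/pypi-mirror-390 | packages/honeyhive/honeyhive-1.0.0rc3.tar.gz/honeyhive-1.0.0rc3/.agent-os/scripts/validate-readme-hierarchy.py | extract_quality_targets
-- ===== SOURCE A (Python) =====
-- from typing import List, Dict, Set, Tuple
--
-- def extract_quality_targets(content: str) -> Dict[str, str]:
--     """Extract quality targets using simple, reliable string operations."""
--     targets = {}
--
--     # Define the canonical quality targets we expect
--     canonical_targets = {
--         "pass_rate": "100",  # 100% pass rate
--         "coverage": "90",  # 90%+ coverage for unit tests
--         "pylint": "10.0",  # 10.0/10 Pylint score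
--         "mypy": "0",  # 0 MyPy errors
--     }
--
--     # Look for specific, well-defined quality target statements
--     content_lower = content.lower()
--
--     # Look for explicit quality target sections
--     if "quality targets" in content_lower:
--         # Find the quality targets section
--         lines = content.split("\n")
--         in_quality_section = False
--
--         for line in lines:
--             line_lower = line.lower().strip()
--
--             # Start of quality targets section
--             if "quality targets" in line_lower:
--                 in_quality_section = True
--                 continue
--
--             # End of section (next major heading)
--             if (
--                 in_quality_section
--                 and line.startswith("#")
--                 and "quality" not in line_lower
--             ):
--                 break
--
--             if in_quality_section:
--                 # Look for specific patterns in quality target sections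
--                 if "100%" in line and "pass" in line_lower:
--                     targets["pass_rate"] = "100"
--
--                 if (
--                     "90%" in line
--                     and "coverage" in line_lower
--                     and "pass" not in line_lower
--                 ):
--                     targets["coverage"] = "90"
--
--                 if "10.0/10" in line and "pylint" in line_lower:
--                     targets["pylint"] = "10.0"
--
--                 if "0" in line and "mypy" in line_lower and "error" in line_lower:
--                     targets["mypy"] = "0"
--
--     # If no quality targets section found, return canonical targets
--     # This avoids false positives from random mentions in text
--     if not targets:
--         return canonical_targets
--
--     return targets
-- ===== SOURCE B (Python) =====
-- def extract_quality_targets(content: str):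
--     """Extract quality targets using simple, reliable string operations."""
--     canonical_targets = {
--         "pass_rate": "100",
--         "coverage": "90",
--         "pylint": "10.0",
--         "mypy": "0",
--     }
--
--     if "quality targets" not in content.lower():
--         return canonical_targets
--
--     # Phase 1: advance past the first 'quality targets' line.
--     it = iter(content.split("\n"))
--     for line in it:
--         if "quality targets" in line.lower().strip():
--             break
--
--     # Phase 2: collect the section lines (skip restarts, stop at next heading).
--     section = []
--     for line in it:
--         low = line.lower().strip()
--         if "quality targets" in low:
--             continue
--         if line.startswith("#") and "quality" not in low:
--             break
--         section.append((line, low))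
--
--     # Phase 3: parse the collected section with a table of checks.
--     targets = {}
--     for line, low in section:
--         for key, val, ok in (
--             ("pass_rate", "100", "100%" in line and "pass" in low),
--             ("coverage", "90", "90%" in line and "coverage" in low and "pass" not in low),
--             ("pylint", "10.0", "10.0/10" in line and "pylint" in low),
--             ("mypy", "0", "0" in line and "mypy" in low and "error" in low),
--         ):
--             if ok:
--                 targets[key] = val
--
--     return targets or canonical_targets
-- ===== Notes on version B (the rewrite author's own statement) =====
-- stated objective: alternative
-- what changed: Replaces A's single stateful loop (in_quality_section flag threaded through every line) by a guard plus three separate phases: advance the iterator past the first 'quality targets' line, collect the section lines into a list, then parse that list with a data table of (key, value, condition) checks.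
import Mathlib
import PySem

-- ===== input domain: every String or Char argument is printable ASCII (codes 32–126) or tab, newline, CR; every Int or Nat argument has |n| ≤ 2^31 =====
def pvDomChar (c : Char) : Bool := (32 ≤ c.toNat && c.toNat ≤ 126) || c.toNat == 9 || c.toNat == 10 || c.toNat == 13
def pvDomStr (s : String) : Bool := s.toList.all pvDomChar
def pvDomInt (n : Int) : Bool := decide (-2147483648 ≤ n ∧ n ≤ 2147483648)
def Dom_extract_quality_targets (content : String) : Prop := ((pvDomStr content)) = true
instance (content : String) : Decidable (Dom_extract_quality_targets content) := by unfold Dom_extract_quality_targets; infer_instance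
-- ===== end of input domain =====

-- B restructures A's single stateful loop into a guard plus three phases (advance / collect / table-driven parse); same result.

-- content.split("\n"): sep ≠ "" so Str.split? is always `some`; the [] default is unreachable
def qtSplitLines (s : String) : List String := (PySem.Str.split? s "\n").getD []

-- ===== PORT A =====
def qtCanonicalA : List (String × String) :=
  [("pass_rate", "100"), ("coverage", "90"), ("pylint", "10.0"), ("mypy", "0")]

-- the body of A's 'if in_quality_section:' block: the four pattern checks on one line
def qtParseLineA (line : String) (targets : PySem.Dict String String) :
    PySem.Dict String String :=
  let lineLower := PySem.Str.strip (PySem.Str.lower line)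
  let t := if PySem.Str.isIn "100%" line && PySem.Str.isIn "pass" lineLower then
      PySem.Dict.insert targets "pass_rate" "100" else targets
  let t := if PySem.Str.isIn "90%" line && PySem.Str.isIn "coverage" lineLower
      && !PySem.Str.isIn "pass" lineLower then PySem.Dict.insert t "coverage" "90" else t
  let t := if PySem.Str.isIn "10.0/10" line && PySem.Str.isIn "pylint" lineLower then
      PySem.Dict.insert t "pylint" "10.0" else t
  if PySem.Str.isIn "0" line && PySem.Str.isIn "mypy" lineLower
      && PySem.Str.isIn "error" lineLower then PySem.Dict.insert t "mypy" "0" else t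

-- A's for-loop over lines with the in_quality_section flag and break, as structural recursion
def qtLoopA (lines : List String) (inSec : Bool) (targets : PySem.Dict String String) :
    PySem.Dict String String :=
  match lines with
  | [] => targets
  | line :: rest =>
    let lineLower := PySem.Str.strip (PySem.Str.lower line)
    if PySem.Str.isIn "quality targets" lineLower then
      qtLoopA rest true targets
    else if inSec && PySem.Str.startswith line "#" && !PySem.Str.isIn "quality" lineLower then
      targets
    else if inSec then
      qtLoopA rest inSec (qtParseLineA line targets)
    else
      qtLoopA rest inSec targets

def extract_quality_targets (content : String) : List (String × String) :=
  let targets : PySem.Dict String String := PySem.Dict.empty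
  let contentLower := PySem.Str.lower content
  let targets :=
    if PySem.Str.isIn "quality targets" contentLower then
      qtLoopA (qtSplitLines content) false targets
    else targets
  if targets.items = [] then qtCanonicalA else targets.items

-- ===== PORT B =====
def qtCanonicalB : List (String × String) :=
  [("pass_rate", "100"), ("coverage", "90"), ("pylint", "10.0"), ("mypy", "0")]

-- Phase 1: consume lines up to and including the first 'quality targets' line
def qtAdvance (lines : List String) : List String :=
  match lines with
  | [] => []
  | line :: rest =>
    if PySem.Str.isIn "quality targets" (PySem.Str.strip (PySem.Str.lower line)) then rest
    else qtAdvance rest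

-- Phase 2: collect (line, low) pairs of the section (skip restarts, stop at next heading)
def qtCollect (lines : List String) : List (String × String) :=
  match lines with
  | [] => []
  | line :: rest =>
    let low := PySem.Str.strip (PySem.Str.lower line)
    if PySem.Str.isIn "quality targets" low then qtCollect rest
    else if PySem.Str.startswith line "#" && !PySem.Str.isIn "quality" low then []
    else (line, low) :: qtCollect rest

-- Phase 3: the table of (key, value, check) rows for one (line, low) pair
def qtChecks (line low : String) : List (String × String × Bool) :=
  [("pass_rate", "100", PySem.Str.isIn "100%" line && PySem.Str.isIn "pass" low),
   ("coverage", "90", PySem.Str.isIn "90%" line && PySem.Str.isIn "coverage" low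
      && !PySem.Str.isIn "pass" low),
   ("pylint", "10.0", PySem.Str.isIn "10.0/10" line && PySem.Str.isIn "pylint" low),
   ("mypy", "0", PySem.Str.isIn "0" line && PySem.Str.isIn "mypy" low
      && PySem.Str.isIn "error" low)]

def extract_quality_targets_alt (content : String) : List (String × String) :=
  if !PySem.Str.isIn "quality targets" (PySem.Str.lower content) then qtCanonicalB
  else
    let sec := qtCollect (qtAdvance (qtSplitLines content))
    let targets := sec.foldl
      (fun t p => (qtChecks p.1 p.2).foldl
        (fun t row => if row.2.2 then PySem.Dict.insert t row.1 row.2.1 else t) t)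
      (PySem.Dict.empty : PySem.Dict String String)
    if targets.items = [] then qtCanonicalB else targets.items

-- ===== PRECONDITION & SPEC =====
def Spec_extract_quality_targets (content : String) (out : List (String × String)) : Prop := out = extract_quality_targets_alt content
instance (content : String) (out : List (String × String)) : Decidable (Spec_extract_quality_targets content out) := by unfold Spec_extract_quality_targets; infer_instance

-- ===== CLAIM (what is proved, stated in full; the proofs are below) =====
def Claim_equal_extract_quality_targets : Prop := ∀ (content : String), Dom_extract_quality_targets content → Spec_extract_quality_targets content (extract_quality_targets content)

-- ===== LEMMAS AND PROOFS =====

-- A's four inline checks on one line = B's fold over its check table for that line.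
theorem qtParseLineA_eq_checks (line : String) (t : PySem.Dict String String) :
    qtParseLineA line t = (qtChecks line (PySem.Str.strip (PySem.Str.lower line))).foldl
      (fun t row => if row.2.2 then PySem.Dict.insert t row.1 row.2.1 else t) t := by
  simp only [qtParseLineA, qtChecks, List.foldl]

-- In-section: A's loop equals B's collect-then-fold, for any accumulated dict.
theorem qtLoopA_true_eq (lines : List String) (t : PySem.Dict String String) :
    qtLoopA lines true t = (qtCollect lines).foldl
      (fun t p => (qtChecks p.1 p.2).foldl
        (fun t row => if row.2.2 then PySem.Dict.insert t row.1 row.2.1 else t) t) t := by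
  induction lines generalizing t with
  | nil => rfl
  | cons line rest ih =>
    simp only [qtLoopA, qtCollect]
    by_cases h1 : PySem.Str.isIn "quality targets" (PySem.Str.strip (PySem.Str.lower line)) = true
    · rw [if_pos h1, if_pos h1, ih]
    · rw [if_neg h1, if_neg h1]
      by_cases h2 : (PySem.Str.startswith line "#"
          && !PySem.Str.isIn "quality" (PySem.Str.strip (PySem.Str.lower line))) = true
      · rw [if_pos (by simpa using h2), if_pos h2]
        simp
      · rw [if_neg (by simpa using h2), if_neg h2, if_pos trivial, ih, List.foldl_cons,
          qtParseLineA_eq_checks]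
  
-- Pre-section: A's loop with the flag off equals advancing then the in-section computation.
theorem qtLoopA_false_eq (lines : List String) (t : PySem.Dict String String) :
    qtLoopA lines false t = qtLoopA (qtAdvance lines) true t := by
  induction lines with
  | nil => rfl
  | cons line rest ih =>
    simp only [qtLoopA, qtAdvance]
    by_cases h1 : PySem.Str.isIn "quality targets" (PySem.Str.strip (PySem.Str.lower line)) = true
    · rw [if_pos h1, if_pos h1]
    · rw [if_neg h1, if_neg h1, if_neg (by simp), if_neg (by simp), ih]

-- ===== VERDICT (by name: the statement is the Claim_ definition above) =====
theorem extract_quality_targets_spec : Claim_equal_extract_quality_targets := by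
  intro content _
  show extract_quality_targets content = extract_quality_targets_alt content
  simp only [extract_quality_targets, extract_quality_targets_alt]
  by_cases hg : PySem.Str.isIn "quality targets" (PySem.Str.lower content) = true
  · rw [if_pos hg, qtLoopA_false_eq, qtLoopA_true_eq,
      if_neg (show ¬(!PySem.Str.isIn "quality targets" (PySem.Str.lower content)) = true by
        simpa using hg)]
    simp only [qtCanonicalA, qtCanonicalB]
  · rw [if_neg hg]
    have hg2 : (!PySem.Str.isIn "quality targets" (PySem.Str.lower content)) = true := by
      simpa using hg
    rw [if_pos hg2]
    simp [qtCanonicalA, qtCanonicalB, PySem.Dict.empty]
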